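-- pv_equiv track=rewrite | github.com/ArturSavchuk/decision_support | Lab2/optimization of binary relations .py | getSnext
-- ===== SOURCE A (Python) =====
-- def getSnext(relation, blockers):
-- 	s1 = []
-- 	for j in range(0, len(relation)):
-- 		valid = True
-- 		for i in range(0, len(relation)):
-- 			if relation[i][j] == 1 and i not in blockers:
-- 				valid = False
-- 				break
-- 			if j in blockers:
-- 				valid = False
-- 				break
-- 		if valid:
-- 			s1.append(j)
--
-- 	return s1
-- ===== SOURCE B (Python) =====
-- def getSnext(relation, blockers):
--     n = len(relation)
--     incoming = set()
--     for i in range(n):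
--         if i not in blockers:
--             for j in range(n):
--                 if relation[i][j] == 1:
--                     incoming.add(j)
--     return [j for j in range(n) if j not in blockers and j not in incoming]
-- ===== Notes on version B (the rewrite author's own statement) =====
-- stated objective: faster
-- what changed: Instead of re-scanning all rows (with per-iteration blocker-list membership tests) for every column, B builds an 'incoming' set of columns hit by non-blocker rows in one pass and then filters the column range once with O(1) set lookups.
-- outside the precondition, e.g. on getSnext([[1, 1], [1]], []): A returns [], B raises IndexError
import Mathlib
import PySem

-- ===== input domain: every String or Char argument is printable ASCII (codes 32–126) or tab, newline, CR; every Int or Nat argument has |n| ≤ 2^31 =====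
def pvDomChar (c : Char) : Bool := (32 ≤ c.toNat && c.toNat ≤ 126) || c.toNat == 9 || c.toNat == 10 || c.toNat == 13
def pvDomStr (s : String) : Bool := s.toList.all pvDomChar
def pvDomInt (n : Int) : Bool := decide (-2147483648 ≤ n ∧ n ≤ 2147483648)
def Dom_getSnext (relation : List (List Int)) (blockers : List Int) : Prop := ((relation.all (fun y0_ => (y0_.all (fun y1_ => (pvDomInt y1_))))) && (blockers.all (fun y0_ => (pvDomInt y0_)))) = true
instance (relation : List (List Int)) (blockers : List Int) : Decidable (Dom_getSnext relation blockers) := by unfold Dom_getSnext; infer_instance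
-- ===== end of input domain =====

-- B replaces A's per-column rescans of all rows by one pass building the set of
-- columns that receive an edge from a non-blocker row, then one filtering pass (measured faster: no per-column row rescans or repeated blocker-list scans).

-- ===== PORT A =====
-- relation[i][j], total form (exact inside Pre_, where every access is in range)
def getSnextEntry (relation : List (List Int)) (i j : Int) : Int :=
  PySem.List.pyGetD (PySem.List.pyGetD relation i []) j 0

-- A's inner 'for i' loop with its two breaks, over the remaining i's
def getSnextValid (relation : List (List Int)) (blockers : List Int) (j : Int) : List Int → Bool
  | [] => true
  | i :: rest =>
    if (getSnextEntry relation i j == 1) && !(blockers.contains i) then false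
    else if blockers.contains j then false
    else getSnextValid relation blockers j rest

def getSnext (relation : List (List Int)) (blockers : List Int) : List Int :=
  (PySem.List.pyRange 0 relation.length 1).foldl
    (fun s1 j =>
      if getSnextValid relation blockers j (PySem.List.pyRange 0 relation.length 1)
      then s1 ++ [j] else s1) []

-- ===== PORT B =====
def getSnext_alt (relation : List (List Int)) (blockers : List Int) : List Int :=
  let n : Int := relation.length
  let incoming : PySem.Set Int :=
    (PySem.List.pyRange 0 n 1).foldl
      (fun s i =>
        if !(blockers.contains i) then
          (PySem.List.pyRange 0 n 1).foldl
            (fun s j => if getSnextEntry relation i j == 1 then PySem.Set.add s j else s) s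
        else s) PySem.Set.empty
  (PySem.List.pyRange 0 n 1).foldl
    (fun out j =>
      if !(blockers.contains j) && !(PySem.Set.contains incoming j) then out ++ [j] else out) []

-- ===== PRECONDITION & SPEC =====
-- Pre_ excludes jagged matrices with a row shorter than the number of rows, on which A's
-- relation[i][j] can raise IndexError (on a few such inputs an earlier break lets A still
-- return — see the cite; B indexes the same entries, so those stay excluded).
def Pre_getSnext (relation : List (List Int)) (_blockers : List Int) : Prop :=
  ∀ row ∈ relation, relation.length ≤ row.length

instance (relation : List (List Int)) (blockers : List Int) : Decidable (Pre_getSnext relation blockers) := by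
  unfold Pre_getSnext; infer_instance

def pvWitness_getSnext : List (List Int) × List Int := ([[0, 1], [1, 0]], [0])

def Spec_getSnext (relation : List (List Int)) (blockers : List Int) (out : List Int) : Prop := out = getSnext_alt relation blockers
instance (relation : List (List Int)) (blockers : List Int) (out : List Int) : Decidable (Spec_getSnext relation blockers out) := by unfold Spec_getSnext; infer_instance

-- ===== CLAIM (what is proved, stated in full; the proofs are below) =====
def Claim_equal_getSnext : Prop := ∀ (relation : List (List Int)) (blockers : List Int), Dom_getSnext relation blockers → Pre_getSnext relation blockers → Spec_getSnext relation blockers (getSnext relation blockers)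

-- ===== LEMMAS AND PROOFS =====

-- membership in the inner set-building fold
theorem mem_foldl_add_if (c : Int → Bool) (l : List Int) (s : PySem.Set Int) (x : Int) :
    x ∈ l.foldl (fun s j => if c j then PySem.Set.add s j else s) s ↔ x ∈ s ∨ (x ∈ l ∧ c x = true) := by
  induction l generalizing s with
  | nil => simp
  | cons j rest ih =>
    simp only [List.foldl_cons, List.mem_cons]
    by_cases hc : c j = true
    · simp [hc, ih, PySem.Set.mem_add]
      constructor
      · rintro ((h | rfl) | h)
        · exact Or.inl h
        · exact Or.inr ⟨Or.inl rfl, hc⟩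
        · exact Or.inr ⟨Or.inr h.1, h.2⟩
      · rintro (h | ⟨(rfl | h), hcx⟩)
        · exact Or.inl (Or.inl h)
        · exact Or.inl (Or.inr rfl)
        · exact Or.inr ⟨h, hcx⟩
    · simp only [hc, ih]
      constructor
      · rintro (h | h)
        · exact Or.inl h
        · exact Or.inr ⟨Or.inr h.1, h.2⟩
      · rintro (h | ⟨(rfl | h), hcx⟩)
        · exact Or.inl h
        · exact (hc hcx).elim
        · exact Or.inr ⟨h, hcx⟩

-- membership in B's incoming set
theorem mem_incoming (relation : List (List Int)) (blockers : List Int) (js : List Int)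
    (l : List Int) (s : PySem.Set Int) (x : Int) :
    x ∈ l.foldl (fun s i =>
        if !(blockers.contains i) then
          js.foldl (fun s j => if getSnextEntry relation i j == 1 then PySem.Set.add s j else s) s
        else s) s
    ↔ x ∈ s ∨ ∃ i ∈ l, blockers.contains i = false ∧ x ∈ js ∧ getSnextEntry relation i x == 1 := by
  induction l generalizing s with
  | nil => simp
  | cons i rest ih =>
    simp only [List.foldl_cons, List.mem_cons]
    by_cases hb : blockers.contains i = true
    · simp only [hb, Bool.not_true, ih]
      constructor
      · rintro (h | ⟨i', hi', h⟩)
        · exact Or.inl h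
        · exact Or.inr ⟨i', Or.inr hi', h⟩
      · rintro (h | ⟨i', (rfl | hi'), hbl, h⟩)
        · exact Or.inl h
        · rw [hb] at hbl; cases hbl
        · exact Or.inr ⟨i', hi', hbl, h⟩
    · rw [Bool.not_eq_true] at hb
      simp only [hb, Bool.not_false, if_true, ih, mem_foldl_add_if]
      constructor
      · rintro ((h | ⟨hx, hc⟩) | ⟨i', hi', h⟩)
        · exact Or.inl h
        · exact Or.inr ⟨i, Or.inl rfl, hb, hx, hc⟩
        · exact Or.inr ⟨i', Or.inr hi', h⟩
      · rintro (h | ⟨i', (rfl | hi'), hbl, hx, hc⟩)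
        · exact Or.inl (Or.inl h)
        · exact Or.inl (Or.inr ⟨hx, hc⟩)
        · exact Or.inr ⟨i', hi', hbl, hx, hc⟩

-- A's inner loop when the current column is a blocker: false as soon as one i is tried
theorem valid_of_blocker (relation : List (List Int)) (blockers : List Int) (j : Int)
    (hj : blockers.contains j = true) (i : Int) (rest : List Int) :
    getSnextValid relation blockers j (i :: rest) = false := by
  simp only [getSnextValid, hj]
  split <;> simp

-- A's inner loop when the current column is not a blocker: an 'all' over the i's
theorem valid_of_not_blocker (relation : List (List Int)) (blockers : List Int) (j : Int)
    (hj : blockers.contains j = false) (l : List Int) :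
    getSnextValid relation blockers j l
      = l.all (fun i => !((getSnextEntry relation i j == 1) && !(blockers.contains i))) := by
  induction l with
  | nil => rfl
  | cons i rest ih =>
    simp only [getSnextValid]
    split
    · next h => rw [List.all_cons, h]; simp
    · next h =>
      rw [Bool.not_eq_true] at h
      rw [if_neg (by rw [hj]; simp), ih, List.all_cons, h]
      simp

-- ===== VERDICT (by name: the statement is the Claim_ definition above) =====
theorem getSnext_spec : Claim_equal_getSnext := by
  intro relation blockers _ _
  unfold Spec_getSnext getSnext getSnext_alt
  rw [PySem.List.foldl_append_if_eq_filter, PySem.List.foldl_append_if_eq_filter]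
  simp only [List.nil_append]
  apply List.filter_congr
  intro j hj
  by_cases hb : blockers.contains j = true
  · obtain ⟨i, rest, hrange⟩ : ∃ i rest, PySem.List.pyRange 0 (relation.length : Int) 1 = i :: rest := by
      cases hR : PySem.List.pyRange 0 (relation.length : Int) 1 with
      | nil => rw [hR] at hj; cases hj
      | cons a l => exact ⟨a, l, rfl⟩
    rw [hrange, valid_of_blocker relation blockers j hb, hb]
    simp only [Bool.not_true, Bool.false_and]
  · rw [Bool.not_eq_true] at hb
    rw [valid_of_not_blocker relation blockers j hb, hb]
    simp only [Bool.not_false, Bool.true_and]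
    have hmem := mem_incoming relation blockers
      (PySem.List.pyRange 0 (relation.length : Int) 1)
      (PySem.List.pyRange 0 (relation.length : Int) 1) PySem.Set.empty j
    rw [Bool.eq_iff_iff]
    constructor
    · intro hall
      have hnotin : j ∉ (PySem.List.pyRange 0 (relation.length : Int) 1).foldl
          (fun s i =>
            if !(blockers.contains i) then
              (PySem.List.pyRange 0 (relation.length : Int) 1).foldl
                (fun s j => if getSnextEntry relation i j == 1 then PySem.Set.add s j else s) s
            else s) PySem.Set.empty := by
        intro hin
        rcases hmem.mp hin with h | ⟨i, hi, hbl, _, hc⟩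
        · exact absurd h (List.not_mem_nil)
        · have hA := List.all_eq_true.mp hall i hi
          rw [hc, hbl] at hA
          simp at hA
      cases hcc : PySem.Set.contains ((PySem.List.pyRange 0 (relation.length : Int) 1).foldl
          (fun s i =>
            if !(blockers.contains i) then
              (PySem.List.pyRange 0 (relation.length : Int) 1).foldl
                (fun s j => if getSnextEntry relation i j == 1 then PySem.Set.add s j else s) s
            else s) PySem.Set.empty) j with
      | false => rfl
      | true => exact absurd ((PySem.Set.contains_iff _ _).mp hcc) hnotin
    · intro hnc
      rw [Bool.not_eq_true'] at hnc
      have hnotin : j ∉ (PySem.List.pyRange 0 (relation.length : Int) 1).foldl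
          (fun s i =>
            if !(blockers.contains i) then
              (PySem.List.pyRange 0 (relation.length : Int) 1).foldl
                (fun s j => if getSnextEntry relation i j == 1 then PySem.Set.add s j else s) s
            else s) PySem.Set.empty := by
        intro hin
        rw [(PySem.Set.contains_iff _ _).mpr hin] at hnc
        cases hnc
      rw [List.all_eq_true]
      intro i hi
      cases hcond : ((getSnextEntry relation i j == 1) && !(blockers.contains i)) with
      | false => rfl
      | true =>
        rw [Bool.and_eq_true, Bool.not_eq_true'] at hcond
        exact absurd (hmem.mpr (Or.inr ⟨i, hi, hcond.2, hj, hcond.1⟩)) hnotin
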